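-- pv_equiv track=rewrite | github.com/shrutiroy03/hitori-rl | src/hitori_play.py | check_rule1
-- ===== SOURCE A (Python) =====
-- from typing import List, Tuple
--
-- def check_rule1(board: List[List[int]]) -> bool:
--     size = len(board)
--     for i in range(size):
--         row_seen = set()
--         col_seen = set()
--         for j in range(size):
--             row_val = board[i][j]
--             col_val = board[j][i]
--             if row_val != 0:
--                 if row_val in row_seen:
--                     return False
--                 row_seen.add(row_val)
--             if col_val != 0:
--                 if col_val in col_seen:
--                     return False
--                 col_seen.add(col_val)
--     return True
-- ===== SOURCE B (Python) =====
-- from typing import List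
--
--
-- def check_rule1(board: List[List[int]]) -> bool:
--     size = len(board)
--     lines = [[board[i][j] for j in range(size)] for i in range(size)] \
--           + [[board[j][i] for j in range(size)] for i in range(size)]
--     for line in lines:
--         vals = sorted(v for v in line if v != 0)
--         if any(a == b for a, b in zip(vals, vals[1:])):
--             return False
--     return True
-- ===== Notes on version B (the rewrite author's own statement) =====
-- stated objective: alternative
-- what changed: Detects duplicates by sorting each row/column's nonzero values and scanning adjacent pairs for equality, instead of A's interleaved scan with incremental seen-sets and per-cell early returns.
-- outside the precondition, e.g. on check_rule1([[1, 2], [1]]): A returns False, B raises IndexError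
import Mathlib
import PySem

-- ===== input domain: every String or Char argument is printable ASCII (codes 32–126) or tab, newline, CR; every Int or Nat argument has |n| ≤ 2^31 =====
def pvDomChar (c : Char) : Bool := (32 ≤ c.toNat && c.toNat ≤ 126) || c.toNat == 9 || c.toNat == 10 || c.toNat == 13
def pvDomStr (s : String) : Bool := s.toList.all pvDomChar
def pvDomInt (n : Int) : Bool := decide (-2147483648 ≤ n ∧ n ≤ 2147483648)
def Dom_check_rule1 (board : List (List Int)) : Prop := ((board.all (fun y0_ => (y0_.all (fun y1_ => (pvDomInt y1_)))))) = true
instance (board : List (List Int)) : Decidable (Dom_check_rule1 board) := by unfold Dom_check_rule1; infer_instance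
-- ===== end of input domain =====

-- B replaces A's interleaved scan with incremental seen-sets and per-cell early
-- returns by sorting each row/column's nonzero values and scanning adjacent pairs
-- for equality; objective: alternative (a different duplicate-detection algorithm).

-- ===== PORT A =====
-- board[i][j] as in A; total via defaults, exact under Pre_ (indices in range)
def c1_cell (board : List (List Int)) (i j : Int) : Int :=
  PySem.List.pyGetD (PySem.List.pyGetD board i []) j 0

-- the inner 'for j' loop of A: row_seen/col_seen state, none = early 'return False'
def c1_inner (board : List (List Int)) (i : Int) :
    List Int → PySem.Set Int → PySem.Set Int → Option Unit
  | [], _, _ => some ()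
  | j :: js, row_seen, col_seen =>
    let row_val := c1_cell board i j
    let col_val := c1_cell board j i
    match (if row_val ≠ 0 then
             (if PySem.Set.contains row_seen row_val then none
              else some (PySem.Set.add row_seen row_val))
           else some row_seen) with
    | none => none
    | some row_seen' =>
      match (if col_val ≠ 0 then
               (if PySem.Set.contains col_seen col_val then none
                else some (PySem.Set.add col_seen col_val))
             else some col_seen) with
      | none => none
      | some col_seen' => c1_inner board i js row_seen' col_seen'

-- the outer 'for i' loop of A
def c1_outer (board : List (List Int)) : List Int → Bool
  | [] => true
  | i :: is =>
    match c1_inner board i (PySem.List.pyRange 0 (board.length : Int) 1)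
            PySem.Set.empty PySem.Set.empty with
    | none => false
    | some _ => c1_outer board is

def check_rule1 (board : List (List Int)) : Bool :=
  c1_outer board (PySem.List.pyRange 0 (board.length : Int) 1)

-- ===== PORT B =====
-- Source B's per-line test: vals = sorted nonzero values; any adjacent pair equal?
-- (zip(vals, vals[1:]) = vals.zip (vals.drop 1); the loop returns False on a hit)
def c1b_ok (line : List Int) : Bool :=
  let vals := PySem.List.sorted (line.filter (fun v => v ≠ 0)) (fun x => x) false
  !((vals.zip (vals.drop 1)).any (fun p => p.1 == p.2))

def check_rule1_alt (board : List (List Int)) : Bool :=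
  let size : Int := board.length
  let lines :=
    (PySem.List.pyRange 0 size 1).map (fun i =>
      (PySem.List.pyRange 0 size 1).map (fun j => c1_cell board i j)) ++
    (PySem.List.pyRange 0 size 1).map (fun i =>
      (PySem.List.pyRange 0 size 1).map (fun j => c1_cell board j i))
  lines.all c1b_ok

-- ===== PRECONDITION & SPEC =====
-- Pre_ excludes jagged boards (a row shorter than the board): there Python A either
-- raises IndexError or happens to return False before reaching the short row, an
-- artefact of the interleaved scan order, while B's eager line-building raises.
def Pre_check_rule1 (board : List (List Int)) : Prop :=
  ∀ row ∈ board, board.length ≤ row.length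
instance (board : List (List Int)) : Decidable (Pre_check_rule1 board) := by
  unfold Pre_check_rule1; infer_instance

def pvWitness_check_rule1 : List (List Int) := [[1, 2], [3, 4]]

def Spec_check_rule1 (board : List (List Int)) (out : Bool) : Prop := out = check_rule1_alt board
instance (board : List (List Int)) (out : Bool) : Decidable (Spec_check_rule1 board out) := by unfold Spec_check_rule1; infer_instance

-- ===== CLAIM (what is proved, stated in full; the proofs are below) =====
def Claim_equal_check_rule1 : Prop := ∀ (board : List (List Int)), Dom_check_rule1 board → Pre_check_rule1 board → Spec_check_rule1 board (check_rule1 board)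

-- ===== LEMMAS AND PROOFS =====

-- one-sided scan: does adding the nonzero values f j one by one into s ever hit a duplicate?
def scanOk (f : Int → Int) : List Int → PySem.Set Int → Bool
  | [], _ => true
  | j :: js, s =>
    if f j ≠ 0 then
      (if PySem.Set.contains s (f j) then false else scanOk f js (PySem.Set.add s (f j)))
    else scanOk f js s

theorem c1_inner_eq_scan (board : List (List Int)) (i : Int) (js : List Int)
    (rs cs : PySem.Set Int) :
    (c1_inner board i js rs cs = some ()) ↔
      (scanOk (fun j => c1_cell board i j) js rs = true ∧
       scanOk (fun j => c1_cell board j i) js cs = true) := by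
  induction js generalizing rs cs with
  | nil => simp [c1_inner, scanOk]
  | cons j js ih =>
    simp only [c1_inner, scanOk]
    split_ifs <;> simp [ih]

theorem scanOk_iff (f : Int → Int) (js : List Int) (s : PySem.Set Int) :
    scanOk f js s = true ↔
      ((js.map f).filter (fun v => v ≠ 0)).Nodup ∧
        ∀ v ∈ (js.map f).filter (fun v => v ≠ 0), v ∉ s := by
  induction js generalizing s with
  | nil => simp [scanOk]
  | cons j js ih =>
    by_cases h0 : f j = 0
    · have hf : ((f j :: js.map f).filter (fun v => v ≠ 0)) =
          (js.map f).filter (fun v => v ≠ 0) := by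
        simp [h0]
      simp only [scanOk, List.map_cons, hf]
      simp [h0, ih]
    · have hf : ((f j :: js.map f).filter (fun v => v ≠ 0)) =
          f j :: (js.map f).filter (fun v => v ≠ 0) := by
        simp [h0]
      simp only [scanOk, List.map_cons, hf]
      by_cases hm : f j ∈ s
      · simp [h0, hm, List.nodup_cons]
      · have hc : PySem.Set.contains s (f j) = false := by simp [hm]
        rw [if_pos h0, hc]
        simp only [Bool.false_eq_true, if_false]
        rw [ih]
        constructor
        · rintro ⟨hn, hnot⟩
          have hjnot : f j ∉ (js.map f).filter (fun v => v ≠ 0) := by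
            intro hmem
            have := hnot _ hmem
            simp [PySem.Set.mem_add] at this
          refine ⟨List.nodup_cons.mpr ⟨hjnot, hn⟩, ?_⟩
          intro v hv
          rcases List.mem_cons.mp hv with rfl | hv
          · exact hm
          · have := hnot _ hv
            simp only [PySem.Set.mem_add, not_or] at this
            exact this.1
        · rintro ⟨hn, hnot⟩
          obtain ⟨hjn, hn'⟩ := List.nodup_cons.mp hn
          refine ⟨hn', ?_⟩
          intro v hv
          simp only [PySem.Set.mem_add, not_or]
          exact ⟨hnot v (List.mem_cons_of_mem _ hv), fun hvj => hjn (hvj ▸ hv)⟩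

-- on a ≤-sorted list, no equal adjacent pair is exactly Nodup
theorem adj_nodup (l : List Int) (hs : l.Pairwise (· ≤ ·)) :
    ((l.zip (l.drop 1)).any (fun p => p.1 == p.2) = false) ↔ l.Nodup := by
  induction l with
  | nil => simp
  | cons a l ih =>
    obtain ⟨ha, hl⟩ := List.pairwise_cons.mp hs
    cases l with
    | nil => simp
    | cons b t =>
      have hzip : ((a :: b :: t).zip ((a :: b :: t).drop 1)) =
          (a, b) :: ((b :: t).zip ((b :: t).drop 1)) := by simp [List.zip]
      rw [hzip, List.any_cons, Bool.or_eq_false_iff, ih hl]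
      constructor
      · rintro ⟨hab, hn⟩
        have hab' : a ≠ b := by simpa using hab
        refine List.nodup_cons.mpr ⟨?_, hn⟩
        intro hmem
        rcases List.mem_cons.mp hmem with rfl | hmem
        · exact hab' rfl
        · have h1 : a ≤ b := ha b List.mem_cons_self
          have h2 : b ≤ a := (List.pairwise_cons.mp hl).1 a hmem
          exact hab' (le_antisymm h1 h2)
      · intro hn
        obtain ⟨hna, hn'⟩ := List.nodup_cons.mp hn
        refine ⟨?_, hn'⟩
        simpa using fun h : a = b => hna (h ▸ List.mem_cons_self)

theorem c1b_ok_iff (line : List Int) :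
    c1b_ok line = true ↔ (line.filter (fun v => v ≠ 0)).Nodup := by
  unfold c1b_ok
  have hp := PySem.List.sorted_pairwise (line.filter (fun v => v ≠ 0)) (fun x => x)
  have hperm := PySem.List.sorted_perm (line.filter (fun v => v ≠ 0)) (fun x => x) false
  rw [Bool.not_eq_eq_eq_not, Bool.not_true, adj_nodup _ hp]
  exact hperm.nodup_iff

theorem c1_outer_all (board : List (List Int)) (is : List Int) :
    c1_outer board is =
      is.all (fun i =>
        decide (c1_inner board i (PySem.List.pyRange 0 (board.length : Int) 1)
          PySem.Set.empty PySem.Set.empty = some ())) := by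
  induction is with
  | nil => simp [c1_outer]
  | cons i is ih =>
    simp only [c1_outer, List.all_cons, ih]
    cases h : c1_inner board i (PySem.List.pyRange 0 (board.length : Int) 1)
        PySem.Set.empty PySem.Set.empty with
    | none => simp
    | some u => cases u; simp

theorem pv_all_and {α : Type} (l : List α) (p q : α → Bool) :
    (l.all fun x => p x && q x) = (l.all p && l.all q) := by
  induction l with
  | nil => simp
  | cons x l ih =>
    simp only [List.all_cons, ih]
    cases p x <;> cases q x <;> simp

-- ===== VERDICT (by name: the statement is the Claim_ definition above) =====
theorem check_rule1_spec : Claim_equal_check_rule1 := by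
  intro board _ _
  unfold Spec_check_rule1 check_rule1 check_rule1_alt
  rw [c1_outer_all, List.all_append]
  simp only [List.all_map, Function.comp_def]
  have h : ∀ i : Int,
      (decide (c1_inner board i (PySem.List.pyRange 0 (board.length : Int) 1)
        PySem.Set.empty PySem.Set.empty = some ())) =
      (c1b_ok ((PySem.List.pyRange 0 (board.length : Int) 1).map (fun j => c1_cell board i j)) &&
       c1b_ok ((PySem.List.pyRange 0 (board.length : Int) 1).map (fun j => c1_cell board j i))) := by
    intro i
    rw [Bool.eq_iff_iff]
    simp only [Bool.and_eq_true, decide_eq_true_eq]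
    rw [c1_inner_eq_scan, scanOk_iff, scanOk_iff, c1b_ok_iff, c1b_ok_iff]
    simp [PySem.Set.empty]
  simp only [h]
  exact pv_all_and _ _ _
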